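-- pv_equiv track=rewrite | github.com/Ren-Xuan/LeetCode | 823-m-numFactoredBinaryTrees.py | numFactoredBinaryTrees2
-- ===== SOURCE A (Python) =====
-- from typing import List
--
-- def numFactoredBinaryTrees2(arr: List[int]) -> int:
--     """
--     dp[k] += (dp[i] * dp[j]) subject to arr[i]*arr[j] == arr[k]
--     """
--     arr.sort()
--     dp = [1]*len(arr)
--     for k in range(len(arr)):
--         for i in range(k):
--             for j in range(k):
--                 if arr[i]*arr[j] == arr[k]:
--                     dp[k] += (dp[i]*dp[j])
--     return sum(dp)%(10**9+7)
-- ===== SOURCE B (Python) =====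
-- from typing import List
--
-- def numFactoredBinaryTrees2(arr: List[int]) -> int:
--     """
--     Sort; one pass with dp-sums indexed by value in a dict, so the inner
--     j-scan of the cubic version becomes an O(1) lookup of the cofactor.
--     (Like the original, this sorts arr in place.)
--     """
--     arr.sort()
--     seen = []      # (value, dp) for earlier indices, in order
--     sums = {}      # value -> sum of dp over earlier indices with that value
--     total = 0      # sum of dp over all earlier indices
--     for x in arr:
--         cur = 1
--         for v, d in seen:
--             if v == 0:
--                 if x == 0:
--                     cur += d * total
--             elif x % v == 0:
--                 cur += d * sums.get(x // v, 0)
--         seen.append((x, cur))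
--         sums[x] = sums.get(x, 0) + cur
--         total += cur
--     return total % (10**9 + 7)
-- ===== Notes on version B (the rewrite author's own statement) =====
-- stated objective: faster
-- what changed: The O(n^3) triple loop (all pairs i,j for each k) is replaced by a single pass over the sorted array keeping a dict value->sum-of-dp, so each factor i finds the dp-sum of its cofactor arr[k]//arr[i] by one hash lookup instead of an inner scan.
import Mathlib
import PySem

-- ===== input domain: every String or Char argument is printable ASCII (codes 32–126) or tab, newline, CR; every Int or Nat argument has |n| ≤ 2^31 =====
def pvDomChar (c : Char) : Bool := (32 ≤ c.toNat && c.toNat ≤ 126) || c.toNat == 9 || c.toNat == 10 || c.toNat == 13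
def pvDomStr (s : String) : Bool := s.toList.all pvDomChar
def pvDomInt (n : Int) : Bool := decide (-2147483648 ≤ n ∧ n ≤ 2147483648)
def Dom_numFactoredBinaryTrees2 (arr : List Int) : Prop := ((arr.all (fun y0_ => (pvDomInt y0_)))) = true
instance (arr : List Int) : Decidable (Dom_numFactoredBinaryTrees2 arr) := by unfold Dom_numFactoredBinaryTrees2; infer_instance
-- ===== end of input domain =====

-- B replaces A's O(n^3) triple loop by one pass over the sorted array with a dict
-- value -> sum-of-dp that looks the cofactor up instead of scanning (measured faster).
-- Both Pythons sort arr in place; the equivalence proved is about the return value.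


-- ===== PORT A =====
-- the three nested loops of A, innermost first (named folds over the same state)
def pvAInner (a : List Int) (k i : Nat) (dp : List Int) : List Int :=
  (List.range k).foldl (fun dp j =>                          --     for j in range(k):
    if a.getD i 0 * a.getD j 0 = a.getD k 0 then             --       if arr[i]*arr[j] == arr[k]:
      dp.set k (dp.getD k 0 + dp.getD i 0 * dp.getD j 0)     --         dp[k] += dp[i]*dp[j]
    else dp) dp

def pvAMiddle (a : List Int) (k : Nat) (dp : List Int) : List Int :=
  (List.range k).foldl (fun dp i => pvAInner a k i dp) dp    --   for i in range(k):

def pvAOuter (a : List Int) : List Int :=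
  (List.range a.length).foldl (fun dp k => pvAMiddle a k dp) --  for k in range(len(arr)):
    (List.replicate a.length 1)                              --  dp = [1]*len(arr)

def numFactoredBinaryTrees2 (arr : List Int) : Int :=
  let a := PySem.List.sorted arr (fun x => x) false          -- arr.sort()
  PySem.Int.mod (pvAOuter a).sum (10 ^ 9 + 7)                -- return sum(dp)%(10**9+7)

-- ===== PORT B =====
-- cur = 1; for v, d in seen: ...
def pvBCur (x total : Int) (sums : PySem.Dict Int Int) (seen : List (Int × Int)) : Int :=
  seen.foldl (fun c p =>
    if p.1 = 0 then
      (if x = 0 then c + p.2 * total else c)                 --   cur += d * total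
    else if PySem.Int.mod x p.1 = 0 then                     -- elif x % v == 0:
      c + p.2 * sums.getD (PySem.Int.floordiv x p.1) 0       --   cur += d * sums.get(x//v, 0)
    else c) 1

-- one iteration of B's main loop; state (seen, sums, total)
def pvBStep (st : List (Int × Int) × PySem.Dict Int Int × Int) (x : Int) :
    List (Int × Int) × PySem.Dict Int Int × Int :=
  let cur := pvBCur x st.2.2 st.2.1 st.1
  (st.1 ++ [(x, cur)],                                       -- seen.append((x, cur))
   st.2.1.insert x (st.2.1.getD x 0 + cur),                  -- sums[x] = sums.get(x, 0) + cur
   st.2.2 + cur)                                             -- total += cur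

def numFactoredBinaryTrees2_alt (arr : List Int) : Int :=
  let a := PySem.List.sorted arr (fun x => x) false          -- arr.sort()
  let st := a.foldl pvBStep ([], PySem.Dict.empty, 0)
  PySem.Int.mod st.2.2 (10 ^ 9 + 7)                          -- return total % (10**9 + 7)

-- ===== PRECONDITION & SPEC =====
def Spec_numFactoredBinaryTrees2 (arr : List Int) (out : Int) : Prop := out = numFactoredBinaryTrees2_alt arr
instance (arr : List Int) (out : Int) : Decidable (Spec_numFactoredBinaryTrees2 arr out) := by unfold Spec_numFactoredBinaryTrees2; infer_instance

-- ===== CLAIM (what is proved, stated in full; the proofs are below) =====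
def Claim_equal_numFactoredBinaryTrees2 : Prop := ∀ (arr : List Int), Dom_numFactoredBinaryTrees2 arr → Spec_numFactoredBinaryTrees2 arr (numFactoredBinaryTrees2 arr)

-- ===== LEMMAS AND PROOFS =====

-- Reference semantics: the dp values produced left to right on the sorted list,
-- as a list of (value, dp) pairs; both ports are reduced to it.
def refT (seen : List (Int × Int)) : Int := (seen.map (fun p => p.2)).sum

def refS (seen : List (Int × Int)) (q : Int) : Int :=
  (seen.map (fun p => if p.1 = q then p.2 else 0)).sum

def refTerm (seen : List (Int × Int)) (x : Int) (p : Int × Int) : Int :=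
  if p.1 = 0 then (if x = 0 then p.2 * refT seen else 0)
  else if PySem.Int.mod x p.1 = 0 then p.2 * refS seen (PySem.Int.floordiv x p.1)
  else 0

def refCur (seen : List (Int × Int)) (x : Int) : Int := 1 + (seen.map (refTerm seen x)).sum

def refStep (s : List (Int × Int)) (x : Int) : List (Int × Int) := s ++ [(x, refCur s x)]

def refSeen (a : List Int) : List (Int × Int) := a.foldl refStep []

lemma refSeen_append (t : List Int) (x : Int) :
    refSeen (t ++ [x]) = refStep (refSeen t) x := by
  simp [refSeen, List.foldl_append]

lemma refSeen_fst (t : List Int) : (refSeen t).map (fun p => p.1) = t := by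
  induction t using List.reverseRecOn with
  | nil => simp [refSeen]
  | append_singleton t x ih => simp [refSeen_append, refStep, ih]

lemma refSeen_length (t : List Int) : (refSeen t).length = t.length := by
  have h := congrArg List.length (refSeen_fst t)
  simpa using h

-- getD/set helpers
lemma getD_set_self' (l : List Int) (k : Nat) (h : k < l.length) (v d : Int) :
    (l.set k v).getD k d = v := by
  rw [List.getD_eq_getElem _ _ (by simpa using h)]
  simp

lemma getD_set_ne' (l : List Int) (i j : Nat) (h : j ≠ i) (v d : Int) :
    (l.set j v).getD i d = l.getD i d := by
  simp [List.getD_eq_getElem?_getD, List.getElem?_set_ne h]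

lemma set_getD_self (l : List Int) (k : Nat) (h : k < l.length) (d : Int) :
    l.set k (l.getD k d) = l := by
  rw [List.getD_eq_getElem _ _ h]
  exact List.set_getElem_self h

-- A's innermost loop accumulates a sum at slot k
lemma inner_go (a : List Int) (k i : Nat) (hik : i ≠ k) (l : List Nat) :
    ∀ (dp : List Int), (∀ j ∈ l, j < k) → k < dp.length →
    l.foldl (fun dp j =>
        if a.getD i 0 * a.getD j 0 = a.getD k 0 then
          dp.set k (dp.getD k 0 + dp.getD i 0 * dp.getD j 0)
        else dp) dp
    = dp.set k (dp.getD k 0 +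
        (l.map (fun j => if a.getD i 0 * a.getD j 0 = a.getD k 0
          then dp.getD i 0 * dp.getD j 0 else 0)).sum) := by
  induction l with
  | nil =>
    intro dp _ hk
    simp only [List.foldl_nil, List.map_nil, List.sum_nil, add_zero]
    exact (set_getD_self dp k hk 0).symm
  | cons j l ih =>
    intro dp hmem hk
    have hjk : j ≠ k := Nat.ne_of_lt (hmem j (by simp))
    simp only [List.foldl_cons, List.map_cons, List.sum_cons]
    by_cases hc : a.getD i 0 * a.getD j 0 = a.getD k 0
    · rw [if_pos hc, if_pos hc,
        ih (dp.set k (dp.getD k 0 + dp.getD i 0 * dp.getD j 0))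
          (fun j' hj' => hmem j' (by simp [hj'])) (by simpa using hk)]
      rw [List.set_set]
      have hmap : (l.map (fun j' =>
          if a.getD i 0 * a.getD j' 0 = a.getD k 0 then
            (dp.set k (dp.getD k 0 + dp.getD i 0 * dp.getD j 0)).getD i 0 *
            (dp.set k (dp.getD k 0 + dp.getD i 0 * dp.getD j 0)).getD j' 0
          else 0))
          = l.map (fun j' => if a.getD i 0 * a.getD j' 0 = a.getD k 0
              then dp.getD i 0 * dp.getD j' 0 else 0) := by
        refine List.map_congr_left (fun j' hj' => ?_)
        have hj'k : j' ≠ k := Nat.ne_of_lt (hmem j' (by simp [hj']))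
        rw [getD_set_ne' _ _ _ (fun h => hik h.symm),
            getD_set_ne' _ _ _ (fun h => hj'k h.symm)]
      rw [hmap, getD_set_self' _ _ hk]
      congr 1
      ring
    · rw [if_neg hc, if_neg hc,
        ih dp (fun j' hj' => hmem j' (by simp [hj'])) hk]
      congr 1
      rw [zero_add]

-- A's middle loop accumulates the double sum at slot k
lemma middle_go (a : List Int) (k : Nat) (l : List Nat) :
    ∀ (dp : List Int), (∀ i ∈ l, i < k) → k < dp.length →
    l.foldl (fun dp i => pvAInner a k i dp) dp
    = dp.set k (dp.getD k 0 +
        (l.map (fun i => ((List.range k).map (fun j =>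
          if a.getD i 0 * a.getD j 0 = a.getD k 0
          then dp.getD i 0 * dp.getD j 0 else 0)).sum)).sum) := by
  induction l with
  | nil =>
    intro dp _ hk
    simp only [List.foldl_nil, List.map_nil, List.sum_nil, add_zero]
    exact (set_getD_self dp k hk 0).symm
  | cons i l ih =>
    intro dp hmem hk
    have hik : i ≠ k := Nat.ne_of_lt (hmem i (by simp))
    simp only [List.foldl_cons, List.map_cons, List.sum_cons]
    rw [pvAInner, inner_go a k i hik (List.range k) dp
        (fun j hj => List.mem_range.mp hj) hk]
    set v := dp.getD k 0 + ((List.range k).map (fun j =>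
      if a.getD i 0 * a.getD j 0 = a.getD k 0
      then dp.getD i 0 * dp.getD j 0 else 0)).sum with hv
    rw [ih (dp.set k v) (fun i' hi' => hmem i' (by simp [hi'])) (by simpa using hk)]
    rw [List.set_set]
    have hmap : (l.map (fun i' => ((List.range k).map (fun j =>
        if a.getD i' 0 * a.getD j 0 = a.getD k 0
        then (dp.set k v).getD i' 0 * (dp.set k v).getD j 0 else 0)).sum))
        = l.map (fun i' => ((List.range k).map (fun j =>
          if a.getD i' 0 * a.getD j 0 = a.getD k 0
          then dp.getD i' 0 * dp.getD j 0 else 0)).sum) := by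
      refine List.map_congr_left (fun i' hi' => ?_)
      have hi'k : i' ≠ k := Nat.ne_of_lt (hmem i' (by simp [hi']))
      refine congrArg List.sum (List.map_congr_left (fun j hj => ?_))
      have hjk : j ≠ k := Nat.ne_of_lt (List.mem_range.mp hj)
      rw [getD_set_ne' _ _ _ (fun h => hi'k h.symm),
          getD_set_ne' _ _ _ (fun h => hjk h.symm)]
    rw [hmap, getD_set_self' _ _ hk]
    congr 1
    ring

-- summing g over indices of a list equals summing g over the list
lemma sum_over_range (s : List (Int × Int)) (g : Int × Int → Int) :
    (List.range s.length).map (fun i => g (s.getD i (0, 0))) = s.map g := by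
  induction s using List.reverseRecOn with
  | nil => simp
  | append_singleton t y ih =>
    rw [List.length_append, List.length_singleton, List.range_succ,
        List.map_append, List.map_append]
    congr 1
    · rw [← ih]
      refine List.map_congr_left (fun i hi => ?_)
      rw [List.getD_append _ _ _ i (List.mem_range.mp hi)]
    · simp

-- the heart: the double sum over pairs equals B's per-factor lookup sum
lemma double_sum_eq (seen : List (Int × Int)) (x : Int) :
    (seen.map (fun p => (seen.map (fun q =>
      if p.1 * q.1 = x then p.2 * q.2 else 0)).sum)).sum
    = (seen.map (refTerm seen x)).sum := by
  refine congrArg List.sum (List.map_congr_left (fun p _ => ?_))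
  by_cases hp : p.1 = 0
  · by_cases hx : x = 0
    · have hmap : (seen.map (fun q => if p.1 * q.1 = x then p.2 * q.2 else 0))
          = seen.map (fun q => p.2 * q.2) := by
        refine List.map_congr_left (fun q _ => ?_)
        rw [if_pos (by rw [hp, hx, zero_mul])]
      rw [hmap, List.sum_map_mul_left, refTerm, if_pos hp, if_pos hx, refT]
    · have hmap : (seen.map (fun q => if p.1 * q.1 = x then p.2 * q.2 else 0))
          = seen.map (fun _ => 0) := by
        refine List.map_congr_left (fun q _ => ?_)
        rw [if_neg (by rw [hp, zero_mul]; exact fun h => hx h.symm)]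
      rw [hmap, refTerm, if_pos hp, if_neg hx]
      simp
  · by_cases hd : p.1 ∣ x
    · have hm : PySem.Int.mod x p.1 = 0 := (PySem.Int.mod_eq_zero_iff_dvd x p.1).mpr hd
      have hc : p.1 * PySem.Int.floordiv x p.1 = x := by
        show p.1 * Int.fdiv x p.1 = x
        rw [Int.fdiv_eq_ediv_of_dvd hd]
        exact Int.mul_ediv_cancel' hd
      have hmap : (seen.map (fun q => if p.1 * q.1 = x then p.2 * q.2 else 0))
          = seen.map (fun q => p.2 * (if q.1 = PySem.Int.floordiv x p.1 then q.2 else 0)) := by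
        refine List.map_congr_left (fun q _ => ?_)
        by_cases hq : q.1 = PySem.Int.floordiv x p.1
        · rw [if_pos hq, if_pos (by rw [hq, hc])]
        · rw [if_neg hq, if_neg (fun h => hq (mul_left_cancel₀ hp (by rw [hc, h]))), mul_zero]
      rw [hmap, List.sum_map_mul_left, refTerm, if_neg hp, if_pos hm, refS]
    · have hm : ¬ PySem.Int.mod x p.1 = 0 := by
        rw [PySem.Int.mod_eq_zero_iff_dvd]; exact hd
      have hmap : (seen.map (fun q => if p.1 * q.1 = x then p.2 * q.2 else 0))
          = seen.map (fun _ => 0) := by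
        refine List.map_congr_left (fun q _ => ?_)
        rw [if_neg (fun h => hd ⟨q.1, h.symm⟩)]
      rw [hmap, refTerm, if_neg hp, if_neg hm]
      simp

-- A's outer loop maintains: dp = dps of the processed prefix ++ untouched 1s
lemma outer_inv (a : List Int) (m : Nat) (hm : m ≤ a.length) :
    (List.range m).foldl (fun dp k => pvAMiddle a k dp) (List.replicate a.length 1)
    = (refSeen (a.take m)).map (fun p => p.2) ++ List.replicate (a.length - m) 1 := by
  induction m with
  | zero => simp [refSeen]
  | succ m ih =>
    have hmn : m < a.length := hm
    obtain ⟨r, hr⟩ : ∃ r, a.length - m = r + 1 := ⟨a.length - m - 1, by omega⟩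
    rw [List.range_succ, List.foldl_append, ih (le_of_lt hmn)]
    set Seen := refSeen (a.take m) with hS
    have hlenS : Seen.length = m := by
      rw [hS, refSeen_length, List.length_take]; omega
    have hlenmap : (Seen.map (fun p => p.2)).length = m := by simpa using hlenS
    set x := a.getD m 0 with hx
    simp only [List.foldl_cons, List.foldl_nil]
    rw [hr, List.replicate_succ, pvAMiddle,
        middle_go a m (List.range m) _ (fun i hi => List.mem_range.mp hi)
          (by simp [hlenmap])]
    set dp := Seen.map (fun p => p.2) ++ 1 :: List.replicate r 1 with hdp
    have hdpk : dp.getD m 0 = 1 := by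
      rw [hdp, List.getD_append_right _ _ _ _ (le_of_eq hlenmap), hlenmap]
      simp
    have hdpi : ∀ i, i < m → dp.getD i 0 = (Seen.getD i (0, 0)).2 := by
      intro i hi
      rw [hdp, List.getD_append _ _ _ i (by omega)]
      have h1 := List.getD_map Seen (0, 0) (n := i) (fun p => p.2)
      simpa using h1
    have hai : ∀ i, i < m → a.getD i 0 = (Seen.getD i (0, 0)).1 := by
      intro i hi
      have h1 := List.getD_map Seen (0, 0) (n := i) (fun p => p.1)
      have h2 : (Seen.map (fun p => p.1)).getD i 0 = a.getD i 0 := by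
        rw [hS, refSeen_fst]
        rw [List.getD_eq_getElem _ _ (by rw [List.length_take]; omega),
            List.getD_eq_getElem _ _ (by omega)]
        exact List.getElem_take
      rw [← h2]
      simpa using h1
    -- rewrite the double range-sum as a double Seen-sum
    have hsum : ((List.range m).map (fun i => ((List.range m).map (fun j =>
        if a.getD i 0 * a.getD j 0 = x
        then dp.getD i 0 * dp.getD j 0 else 0)).sum)).sum
        = (Seen.map (refTerm Seen x)).sum := by
      rw [← double_sum_eq]
      refine congrArg List.sum ?_
      have houter : (List.range m).map (fun i => ((List.range m).map (fun j =>
          if a.getD i 0 * a.getD j 0 = x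
          then dp.getD i 0 * dp.getD j 0 else 0)).sum)
          = (List.range m).map (fun i => ((List.range m).map (fun j =>
            if (Seen.getD i (0,0)).1 * (Seen.getD j (0,0)).1 = x
            then (Seen.getD i (0,0)).2 * (Seen.getD j (0,0)).2 else 0)).sum) := by
        refine List.map_congr_left (fun i hi => ?_)
        refine congrArg List.sum (List.map_congr_left (fun j hj => ?_))
        rw [hai i (List.mem_range.mp hi), hai j (List.mem_range.mp hj),
            hdpi i (List.mem_range.mp hi), hdpi j (List.mem_range.mp hj)]
      rw [houter]
      have hinner : (List.range m).map (fun i => ((List.range m).map (fun j =>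
          if (Seen.getD i (0,0)).1 * (Seen.getD j (0,0)).1 = x
          then (Seen.getD i (0,0)).2 * (Seen.getD j (0,0)).2 else 0)).sum)
          = (List.range m).map (fun i => (Seen.map (fun q =>
            if (Seen.getD i (0,0)).1 * q.1 = x
            then (Seen.getD i (0,0)).2 * q.2 else 0)).sum) := by
        refine List.map_congr_left (fun i _ => ?_)
        refine congrArg List.sum ?_
        rw [← hlenS]
        exact sum_over_range Seen (fun q =>
          if (Seen.getD i (0,0)).1 * q.1 = x
          then (Seen.getD i (0,0)).2 * q.2 else 0)
      rw [hinner, ← hlenS]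
      exact sum_over_range Seen (fun p =>
        (Seen.map (fun q => if p.1 * q.1 = x then p.2 * q.2 else 0)).sum)
    rw [hsum, hdpk]
    -- perform the set at slot m
    rw [hdp, List.set_append_right _ _ (le_of_eq hlenmap), hlenmap]
    simp only [Nat.sub_self, List.set_cons_zero]
    -- identify with refSeen of the longer prefix
    have htake : a.take (m + 1) = a.take m ++ [x] := by
      rw [List.take_add_one, List.getElem?_eq_getElem hmn, hx,
          List.getD_eq_getElem _ _ hmn]
      rfl
    rw [htake, refSeen_append, refStep, ← hS, List.map_append]
    have hlr : a.length - (m + 1) = r := by omega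
    rw [hlr]
    simp [refCur]

-- B's inner loop is 1 + a sum
lemma bcur_go (x total : Int) (sums : PySem.Dict Int Int) (l : List (Int × Int)) :
    ∀ (c : Int),
    l.foldl (fun c p =>
      if p.1 = 0 then (if x = 0 then c + p.2 * total else c)
      else if PySem.Int.mod x p.1 = 0 then
        c + p.2 * sums.getD (PySem.Int.floordiv x p.1) 0
      else c) c
    = c + (l.map (fun p =>
        if p.1 = 0 then (if x = 0 then p.2 * total else 0)
        else if PySem.Int.mod x p.1 = 0 then
          p.2 * sums.getD (PySem.Int.floordiv x p.1) 0
        else 0)).sum := by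
  induction l with
  | nil => intro c; simp
  | cons p l ih =>
    intro c
    simp only [List.foldl_cons, List.map_cons, List.sum_cons]
    rw [ih]
    split_ifs <;> ring

-- B's loop invariant: state = (refSeen prefix, value-indexed dp sums, total dp sum)
lemma b_inv (a : List Int) :
    (a.foldl pvBStep ([], PySem.Dict.empty, 0)).1 = refSeen a ∧
    (a.foldl pvBStep ([], PySem.Dict.empty, 0)).2.2 = refT (refSeen a) ∧
    ∀ q, (a.foldl pvBStep ([], PySem.Dict.empty, 0)).2.1.getD q 0 = refS (refSeen a) q := by
  induction a using List.reverseRecOn with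
  | nil =>
    refine ⟨rfl, by simp [refSeen, refT], fun q => by simp [refSeen, refS]⟩
  | append_singleton t y ih =>
    obtain ⟨ih1, ih2, ih3⟩ := ih
    rw [List.foldl_append]
    set st := t.foldl pvBStep ([], PySem.Dict.empty, 0) with hst
    have hcur : pvBCur y st.2.2 st.2.1 st.1 = refCur (refSeen t) y := by
      rw [pvBCur, ih1, bcur_go, refCur, ih2]
      refine congrArg (fun z => 1 + z) (congrArg List.sum (List.map_congr_left (fun p _ => ?_)))
      rw [refTerm, ih3]
    simp only [List.foldl_cons, List.foldl_nil]
    refine ⟨?_, ?_, ?_⟩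
    · show st.1 ++ [(y, pvBCur y st.2.2 st.2.1 st.1)] = refSeen (t ++ [y])
      rw [hcur, ih1, refSeen_append, refStep]
    · show st.2.2 + pvBCur y st.2.2 st.2.1 st.1 = refT (refSeen (t ++ [y]))
      rw [hcur, ih2, refSeen_append, refStep]
      simp [refT]
    · intro q
      show (st.2.1.insert y (st.2.1.getD y 0 + pvBCur y st.2.2 st.2.1 st.1)).getD q 0
          = refS (refSeen (t ++ [y])) q
      rw [hcur, refSeen_append, refStep, PySem.Dict.getD_insert]
      by_cases hq : q = y
      · rw [if_pos hq, ih3, hq]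
        simp [refS]
      · rw [if_neg hq, ih3]
        have hyq : ¬ y = q := fun h => hq h.symm
        simp [refS, hyq]

lemma a_total (a : List Int) : (pvAOuter a).sum = refT (refSeen a) := by
  rw [pvAOuter, outer_inv a a.length le_rfl]
  simp [refT]

-- ===== VERDICT (by name: the statement is the Claim_ definition above) =====
theorem numFactoredBinaryTrees2_spec : Claim_equal_numFactoredBinaryTrees2 := by
  intro arr _
  show numFactoredBinaryTrees2 arr = numFactoredBinaryTrees2_alt arr
  rw [numFactoredBinaryTrees2, numFactoredBinaryTrees2_alt]
  rw [a_total, (b_inv (PySem.List.sorted arr (fun x => x) false)).2.1]
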